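-- pv_equiv track=rewrite | github.com/TaoziLake/analyzer | core/call_graph.py | _resolve_base_class
-- ===== SOURCE A (Python) =====
-- from typing import Dict, List, Optional, Set, Tuple
--
-- def _resolve_base_class(base_name: str, all_functions: Set[str]) -> Optional[str]:
--     """
--     尝试将基类名称解析为 all_functions 中的完整 qualname。
--     优先精确匹配，其次后缀匹配。
--     """
--     if base_name in all_functions:
--         return base_name
--     # 后缀匹配：找到以 .BaseName 结尾的 qualname
--     candidates = [q for q in all_functions if q.endswith(f".{base_name}") or q == base_name]
--     if len(candidates) == 1:
--         return candidates[0]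
--     # 多个候选时，优先选择看起来像类（不含再下一层点号）的
--     if candidates:
--         # 倾向选择层级最浅的
--         candidates.sort(key=lambda c: c.count("."))
--         return candidates[0]
--     return None
-- ===== SOURCE B (Python) =====
-- from typing import Optional, Set
--
--
-- def _resolve_base_class(base_name: str, all_functions: Set[str]) -> Optional[str]:
--     """Exact match first; otherwise one pass picking the first suffix match
--     with the fewest dots (no intermediate candidate list, no sort)."""
--     if base_name in all_functions:
--         return base_name
--     suffix = "." + base_name
--     best = None
--     best_dots = 0
--     for q in all_functions:
--         if q.endswith(suffix):
--             d = q.count(".")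
--             if best is None or d < best_dots:
--                 best, best_dots = q, d
--     return best
-- ===== Notes on version B (the rewrite author's own statement) =====
-- stated objective: faster
-- what changed: Replaces build-candidate-list + stable sort by dot count with a single streaming pass keeping the current best (first suffix match with fewest dots, strict < preserving A's stable-sort tie-break).
import Mathlib
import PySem

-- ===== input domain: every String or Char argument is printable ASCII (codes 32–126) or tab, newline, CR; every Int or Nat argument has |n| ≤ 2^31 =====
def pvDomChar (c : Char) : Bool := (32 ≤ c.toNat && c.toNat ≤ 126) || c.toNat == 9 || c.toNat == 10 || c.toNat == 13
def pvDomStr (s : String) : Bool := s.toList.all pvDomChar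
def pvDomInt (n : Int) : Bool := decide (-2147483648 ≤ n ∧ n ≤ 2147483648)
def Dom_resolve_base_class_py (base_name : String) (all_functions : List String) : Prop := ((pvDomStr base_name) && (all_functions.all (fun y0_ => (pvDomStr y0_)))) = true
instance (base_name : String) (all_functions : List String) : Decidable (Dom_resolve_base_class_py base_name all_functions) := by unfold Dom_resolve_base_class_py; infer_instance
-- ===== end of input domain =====

-- B replaces A's candidate-list build + stable sort by dot count with one streaming pass
-- keeping the current best (first suffix match with fewest dots, strict <); return value
-- only — A sorts a local list in place, which is not observable by the caller.

-- ===== PORT A =====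
def resolve_base_class_py (base_name : String) (all_functions : List String) : Option String :=
  if all_functions.contains base_name then some base_name
  else
    let candidates := all_functions.filter
      (fun q => PySem.Str.endswith q ("." ++ base_name) || q == base_name)
    if candidates.length == 1 then candidates.head?   -- candidates[0] on a length-1 list
    else if !candidates.isEmpty then
      -- candidates.sort(key=lambda c: c.count(".")); return candidates[0]
      (PySem.List.sorted candidates (fun c => PySem.Str.count c ".")).head?
    else none

-- ===== PORT B =====
def resolve_base_class_py_alt (base_name : String) (all_functions : List String) : Option String :=
  if all_functions.contains base_name then some base_name
  else
    let suffix := "." ++ base_name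
    (all_functions.foldl
      (fun (st : Option String × Nat) q =>
        if PySem.Str.endswith q suffix then
          match st.1 with
          | none => (some q, PySem.Str.count q ".")
          | some _ =>
            if PySem.Str.count q "." < st.2 then (some q, PySem.Str.count q ".") else st
        else st)
      (none, 0)).1

-- ===== PRECONDITION & SPEC =====
def Spec_resolve_base_class_py (base_name : String) (all_functions : List String) (out : Option String) : Prop := out = resolve_base_class_py_alt base_name all_functions
instance (base_name : String) (all_functions : List String) (out : Option String) : Decidable (Spec_resolve_base_class_py base_name all_functions out) := by unfold Spec_resolve_base_class_py; infer_instance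

-- ===== CLAIM (what is proved, stated in full; the proofs are below) =====
def Claim_equal_resolve_base_class_py : Prop := ∀ (base_name : String) (all_functions : List String), Dom_resolve_base_class_py base_name all_functions → Spec_resolve_base_class_py base_name all_functions (resolve_base_class_py base_name all_functions)

-- ===== LEMMAS AND PROOFS =====

-- first element of l with minimal key (a later element wins only with a strictly smaller key)
def pvFM (key : String → Nat) : List String → Option String
  | [] => none
  | x :: t =>
    match pvFM key t with
    | none => some x
    | some m => if key m < key x then some m else some x

theorem head?_insertBy (before : String → String → Bool) (x : String) (acc : List String) :
    (PySem.List.insertBy before x acc).head?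
      = (match acc with | [] => some x | y :: _ => if before x y then some x else some y) := by
  cases acc with
  | nil => simp [PySem.List.insertBy]
  | cons a as => simp only [PySem.List.insertBy]; split_ifs <;> rfl

theorem pvHead_foldl_insertBy (key : String → Nat) :
    ∀ (l acc : List String),
      (l.foldl (fun acc x => PySem.List.insertBy (fun a b => decide (key a < key b)) x acc) acc).head?
        = (match acc.head?, pvFM key l with
           | none, r => r
           | some h, none => some h
           | some h, some m => if key m < key h then some m else some h) := by
  intro l
  induction l with
  | nil => intro acc; cases acc <;> simp [pvFM]
  | cons x t ih =>
    intro acc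
    rw [List.foldl_cons, ih]
    rw [head?_insertBy]
    cases acc with
    | nil =>
      simp only [List.head?, pvFM]
      cases h : pvFM key t <;> simp [h]
    | cons a as =>
      simp only [List.head?, pvFM]
      cases h : pvFM key t with
      | none => simp only [h]; split_ifs <;> simp_all
      | some m => simp only [h]; split_ifs <;> simp_all <;> first | omega | (split_ifs <;> first | rfl | omega)

theorem pvHead_sorted (key : String → Nat) (l : List String) :
    (PySem.List.sorted l key).head? = pvFM key l := by
  rw [PySem.List.sorted_eq_foldl_insertBy, pvHead_foldl_insertBy key l []]
  cases pvFM key l <;> rfl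

theorem pvFold_some (key : String → Nat) :
    ∀ (l : List String) (m : String),
      l.foldl
        (fun (st : Option String × Nat) q =>
          match st.1 with
          | none => (some q, key q)
          | some _ => if key q < st.2 then (some q, key q) else st)
        (some m, key m)
      = (match pvFM key l with
         | none => (some m, key m)
         | some x => if key x < key m then (some x, key x) else (some m, key m)) := by
  intro l
  induction l with
  | nil => intro m; simp [pvFM]
  | cons x t ih =>
    intro m
    rw [List.foldl_cons]
    show t.foldl _ (if key x < key m then (some x, key x) else (some m, key m)) = _
    simp only [pvFM]
    by_cases hxm : key x < key m
    · rw [if_pos hxm, ih x]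
      cases h : pvFM key t with
      | none => simp [hxm]
      | some w => simp only [h]; split_ifs <;> simp_all <;> first | omega | (split_ifs <;> first | rfl | omega)
    · rw [if_neg hxm, ih m]
      cases h : pvFM key t with
      | none => simp [hxm]
      | some w => simp only [h]; split_ifs <;> simp_all <;> first | omega | (split_ifs <;> first | rfl | omega)

theorem pvFold_eq_pvFM (key : String → Nat) (l : List String) :
    (l.foldl
        (fun (st : Option String × Nat) q =>
          match st.1 with
          | none => (some q, key q)
          | some _ => if key q < st.2 then (some q, key q) else st)
        (none, 0)).1 = pvFM key l := by
  cases l with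
  | nil => rfl
  | cons x t =>
    rw [List.foldl_cons]
    show (t.foldl _ (some x, key x)).1 = _
    rw [pvFold_some key t x]
    simp only [pvFM]
    cases h : pvFM key t with
    | none => rfl
    | some w => simp only [h]; split_ifs <;> rfl

-- ===== VERDICT (by name: the statement is the Claim_ definition above) =====
theorem resolve_base_class_py_spec : Claim_equal_resolve_base_class_py := by
  intro base_name all_functions _
  unfold Spec_resolve_base_class_py resolve_base_class_py resolve_base_class_py_alt
  by_cases hc : all_functions.contains base_name
  · rw [if_pos hc, if_pos hc]
  · rw [if_neg hc, if_neg hc]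
    -- in this branch base_name is in no element, so A's filter is the pure suffix filter
    have hmem : base_name ∉ all_functions := by
      simpa [List.contains_iff_mem] using hc
    have hfil :
        all_functions.filter (fun q => PySem.Str.endswith q ("." ++ base_name) || q == base_name)
          = all_functions.filter (fun q => PySem.Str.endswith q ("." ++ base_name)) := by
      apply List.filter_congr
      intro q hq
      have hne : (q == base_name) = false := by
        simp only [beq_eq_false_iff_ne]
        intro h; exact hmem (h ▸ hq)
      simp [hne]
    -- B's guarded fold is the plain first-minimum fold over the filtered list
    have hB :
        (all_functions.foldl
          (fun (st : Option String × Nat) q =>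
            if PySem.Str.endswith q ("." ++ base_name) then
              match st.1 with
              | none => (some q, PySem.Str.count q ".")
              | some _ =>
                if PySem.Str.count q "." < st.2 then (some q, PySem.Str.count q ".") else st
            else st)
          (none, 0)).1
        = pvFM (fun c => PySem.Str.count c ".")
            (all_functions.filter (fun q => PySem.Str.endswith q ("." ++ base_name))) := by
      rw [← List.foldl_filter, pvFold_eq_pvFM]
    rw [hB, hfil]
    cases hl : all_functions.filter (fun q => PySem.Str.endswith q ("." ++ base_name)) with
    | nil => rfl
    | cons c cs =>
      cases cs with
      | nil => simp [pvFM]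
      | cons d ds =>
        rw [if_neg (by simp), if_pos (by simp)]
        exact pvHead_sorted _ (c :: d :: ds)
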